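-- pv_equiv track=rewrite | github.com/mapleleaflatte03/meridian-intelligence | company/meridian_platform/commitments.py | _settlement_ref_matches
-- ===== SOURCE A (Python) =====
-- def _settlement_ref_keys(ref):
--     return [
--         (field, value)
--         for field in ('envelope_id', 'receipt_id', 'proposal_id', 'tx_ref', 'tx_hash')
--         for value in [str((ref or {}).get(field) or '').strip()]
--         if value
--     ]
--
-- def _settlement_ref_matches(existing_ref, candidate_ref):
--     existing_keys = _settlement_ref_keys(existing_ref)
--     candidate_keys = _settlement_ref_keys(candidate_ref)
--     for candidate_field, candidate_value in candidate_keys: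
--         for existing_field, existing_value in existing_keys:
--             if candidate_field == existing_field and candidate_value == existing_value:
--                 return True
--     return False
-- ===== SOURCE B (Python) =====
-- def _settlement_ref_matches(existing_ref, candidate_ref):
--     for field in ('envelope_id', 'receipt_id', 'proposal_id', 'tx_ref', 'tx_hash'):
--         e = str((existing_ref or {}).get(field) or '').strip()
--         c = str((candidate_ref or {}).get(field) or '').strip()
--         if e and c and e == c:
--             return True
--     return False
-- ===== Notes on version B (the rewrite author's own statement) =====
-- stated objective: simpler
-- what changed: Replaces the helper that builds two (field,value) key lists plus the nested double scan with a single field-aligned pass that computes both stripped values inline and returns on the first nonempty match.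
import Mathlib
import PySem

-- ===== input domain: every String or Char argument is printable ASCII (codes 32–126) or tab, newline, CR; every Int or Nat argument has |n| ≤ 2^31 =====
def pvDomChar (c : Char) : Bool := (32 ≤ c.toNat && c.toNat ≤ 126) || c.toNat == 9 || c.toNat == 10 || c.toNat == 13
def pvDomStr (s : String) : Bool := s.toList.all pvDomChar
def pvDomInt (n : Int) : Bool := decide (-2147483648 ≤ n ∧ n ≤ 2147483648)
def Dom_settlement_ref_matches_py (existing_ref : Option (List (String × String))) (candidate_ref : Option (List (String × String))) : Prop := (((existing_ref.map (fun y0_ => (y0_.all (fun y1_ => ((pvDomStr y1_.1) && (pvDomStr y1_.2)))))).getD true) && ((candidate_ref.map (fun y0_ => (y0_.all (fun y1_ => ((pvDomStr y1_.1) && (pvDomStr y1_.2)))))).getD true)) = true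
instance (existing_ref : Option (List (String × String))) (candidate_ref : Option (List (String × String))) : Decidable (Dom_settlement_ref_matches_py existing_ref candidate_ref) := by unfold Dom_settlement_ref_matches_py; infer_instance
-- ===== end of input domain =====

-- B replaces A's two built key-lists and nested double scan with one field-aligned pass computing both stripped values inline (objective: simpler).


-- ===== PORT A =====
-- str((ref or {}).get(field) or '').strip()  — dict lookup is first match in the assoc list; '' if ref is None or key missing/empty
def pvGetStr (ref : Option (List (String × String))) (field : String) : String :=
  PySem.Str.strip ((((ref.getD []).find? (fun p => p.1 == field)).map Prod.snd).getD "")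

def pvFields : List String := ["envelope_id", "receipt_id", "proposal_id", "tx_ref", "tx_hash"]

-- _settlement_ref_keys: the comprehension building the (field, value) list
def pvKeysA (ref : Option (List (String × String))) : List (String × String) :=
  pvFields.flatMap (fun field =>
    let value := pvGetStr ref field
    if value ≠ "" then [(field, value)] else [])

-- the inner 'for existing_field, existing_value in existing_keys' loop
def pvInnerA (cf cv : String) : List (String × String) → Bool
  | [] => false
  | (ef, ev) :: rest => if cf == ef && cv == ev then true else pvInnerA cf cv rest

-- the outer 'for candidate_field, candidate_value in candidate_keys' loop
def pvOuterA (ek : List (String × String)) : List (String × String) → Bool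
  | [] => false
  | (cf, cv) :: rest => if pvInnerA cf cv ek then true else pvOuterA ek rest

def settlement_ref_matches_py (existing_ref : Option (List (String × String))) (candidate_ref : Option (List (String × String))) : Bool :=
  pvOuterA (pvKeysA existing_ref) (pvKeysA candidate_ref)

-- ===== PORT B =====
-- single pass over the field tuple, both values computed inline, early return on a match
def pvLoopB (existing_ref candidate_ref : Option (List (String × String))) : List String → Bool
  | [] => false
  | field :: rest =>
    let e := pvGetStr existing_ref field
    let c := pvGetStr candidate_ref field
    if e ≠ "" && c ≠ "" && e == c then true else pvLoopB existing_ref candidate_ref rest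

def settlement_ref_matches_py_alt (existing_ref : Option (List (String × String))) (candidate_ref : Option (List (String × String))) : Bool :=
  pvLoopB existing_ref candidate_ref pvFields

-- ===== PRECONDITION & SPEC =====
def Spec_settlement_ref_matches_py (existing_ref : Option (List (String × String))) (candidate_ref : Option (List (String × String))) (out : Bool) : Prop := out = settlement_ref_matches_py_alt existing_ref candidate_ref
instance (existing_ref : Option (List (String × String))) (candidate_ref : Option (List (String × String))) (out : Bool) : Decidable (Spec_settlement_ref_matches_py existing_ref candidate_ref out) := by unfold Spec_settlement_ref_matches_py; infer_instance

-- ===== CLAIM (what is proved, stated in full; the proofs are below) =====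
def Claim_equal_settlement_ref_matches_py : Prop := ∀ (existing_ref : Option (List (String × String))) (candidate_ref : Option (List (String × String))), Dom_settlement_ref_matches_py existing_ref candidate_ref → Spec_settlement_ref_matches_py existing_ref candidate_ref (settlement_ref_matches_py existing_ref candidate_ref)

-- ===== LEMMAS AND PROOFS =====
lemma pvInnerA_eq_true (cf cv : String) (ek : List (String × String)) :
    pvInnerA cf cv ek = true ↔ (cf, cv) ∈ ek := by
  induction ek with
  | nil => simp [pvInnerA]
  | cons p rest ih =>
    obtain ⟨ef, ev⟩ := p
    simp only [pvInnerA, List.mem_cons]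
    split_ifs with h
    · simp_all
    · simp only [Bool.and_eq_true, beq_iff_eq] at h
      rw [ih]
      constructor
      · exact Or.inr
      · rintro (h1 | h2)
        · exact absurd (Prod.mk.injEq .. ▸ h1) (by simpa [and_comm] using fun a b => h ⟨a, b⟩)
        · exact h2

lemma pvOuterA_eq_true (ek ck : List (String × String)) :
    pvOuterA ek ck = true ↔ ∃ p ∈ ck, p ∈ ek := by
  induction ck with
  | nil => simp [pvOuterA]
  | cons p rest ih =>
    obtain ⟨cf, cv⟩ := p
    simp only [pvOuterA]
    split_ifs with h
    · simp only [true_iff]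
      exact ⟨(cf, cv), List.mem_cons_self .., (pvInnerA_eq_true ..).mp h⟩
    · rw [ih]
      constructor
      · rintro ⟨q, hq, hq2⟩; exact ⟨q, List.mem_cons_of_mem _ hq, hq2⟩
      · rintro ⟨q, hq, hq2⟩
        rcases List.mem_cons.mp hq with rfl | hq'
        · exact absurd ((pvInnerA_eq_true ..).mpr hq2) (by simpa using h)
        · exact ⟨q, hq', hq2⟩

lemma pvMem_keysA {ref : Option (List (String × String))} {f v : String} :
    (f, v) ∈ pvKeysA ref ↔ f ∈ pvFields ∧ v = pvGetStr ref f ∧ v ≠ "" := by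
  simp only [pvKeysA, List.mem_flatMap]
  constructor
  · rintro ⟨g, hg, hmem⟩
    by_cases h : pvGetStr ref g ≠ "" <;> simp [h] at hmem
    obtain ⟨rfl, rfl⟩ := hmem
    exact ⟨hg, rfl, h⟩
  · rintro ⟨hf, rfl, hne⟩
    exact ⟨f, hf, by simp [hne]⟩

lemma pvLoopB_eq_true (e c : Option (List (String × String))) (fs : List String) :
    pvLoopB e c fs = true ↔
      ∃ f ∈ fs, pvGetStr e f ≠ "" ∧ pvGetStr c f ≠ "" ∧ pvGetStr e f = pvGetStr c f := by
  induction fs with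
  | nil => simp [pvLoopB]
  | cons f rest ih =>
    simp only [pvLoopB]
    split_ifs with h
    · simp only [Bool.and_eq_true, decide_eq_true_eq, beq_iff_eq] at h
      simp only [true_iff]
      exact ⟨f, List.mem_cons_self .., h.1.1, h.1.2, h.2⟩
    · rw [ih]
      simp only [Bool.and_eq_true, decide_eq_true_eq, beq_iff_eq] at h
      constructor
      · rintro ⟨g, hg, hs⟩; exact ⟨g, List.mem_cons_of_mem _ hg, hs⟩
      · rintro ⟨g, hg, h1, h2, h3⟩
        rcases List.mem_cons.mp hg with rfl | hg'
        · exact absurd ⟨⟨h1, h2⟩, h3⟩ h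
        · exact ⟨g, hg', h1, h2, h3⟩


-- ===== VERDICT (by name: the statement is the Claim_ definition above) =====
theorem settlement_ref_matches_py_spec : Claim_equal_settlement_ref_matches_py := by
  intro e c _
  unfold Spec_settlement_ref_matches_py settlement_ref_matches_py settlement_ref_matches_py_alt
  apply Bool.eq_iff_iff.mpr
  rw [pvOuterA_eq_true, pvLoopB_eq_true]
  constructor
  · rintro ⟨⟨f, v⟩, hc, he⟩
    rw [pvMem_keysA] at hc he
    obtain ⟨hf, hvc, hvne⟩ := hc
    obtain ⟨-, hve, -⟩ := he
    exact ⟨f, hf, hve ▸ hvne, hvc ▸ hvne, hve ▸ hvc ▸ rfl⟩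
  · rintro ⟨f, hf, he, hc, hev⟩
    exact ⟨(f, pvGetStr c f), pvMem_keysA.mpr ⟨hf, rfl, hc⟩, pvMem_keysA.mpr ⟨hf, hev.symm, hev ▸ hc⟩⟩
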